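-- pv_equiv track=rewrite | github.com/maartenpeels/aoc-2024 | day8/day8.py | part2
-- ===== SOURCE A (Python) =====
-- def is_colinear(point, antenna1, antenna2):
--     return (antenna1[0] - point[0]) * (antenna2[1] - point[1]) == (antenna1[1] - point[1]) * (antenna2[0] - point[0])
--
-- def part2(grid, antennas):
--     result = 0
--
--     for key, antenna_list in antennas.items():
--         if len(antenna_list) < 2:
--             continue
--
--         for row in range(len(grid)):
--             for col in range(len(grid[0])):
--                 for antenna1 in antenna_list:
--                     for antenna2 in antenna_list:
--                         if antenna1 == antenna2:
--                             continue
--                         if is_colinear((row, col), antenna1, antenna2):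
--                             result += 1
--                             break
--
--     return result
-- ===== SOURCE B (Python) =====
-- def _gcd(a, b):
--     return a if b == 0 else _gcd(b, a % b)
--
--
-- def _reduce(dx, dy):
--     g = _gcd(abs(dx), abs(dy))
--     if g == 0:
--         return (0, 0)
--     dx, dy = dx // g, dy // g
--     if dx < 0 or (dx == 0 and dy < 0):
--         return (-dx, -dy)
--     return (dx, dy)
--
--
-- def part2(grid, antennas):
--     rows = len(grid)
--     cols = len(grid[0]) if grid else 0
--     total = 0
--     for antenna_list in antennas.values():
--         for a1 in antenna_list:
--             dirs = set()
--             for a2 in antenna_list: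
--                 if a2 != a1:
--                     dirs.add(_reduce(a2[0] - a1[0], a2[1] - a1[1]))
--             if not dirs:
--                 continue
--             for r in range(rows):
--                 for c in range(cols):
--                     if (r, c) == a1 or _reduce(r - a1[0], c - a1[1]) in dirs:
--                         total += 1
--     return total
-- ===== Notes on version B (the rewrite author's own statement) =====
-- stated objective: alternative
-- what changed: A tests, for every grid cell and antenna1, each antenna2 with a cross-product colinearity scan (break on first hit); B instead precomputes per antenna1 the set of gcd-reduced directions to the other antennas and classifies each cell by reducing its offset from antenna1 and looking it up in that set, swapping the loop nest (antennas outer, cells inner) and dropping the redundant len<2 guard.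
import Mathlib
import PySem

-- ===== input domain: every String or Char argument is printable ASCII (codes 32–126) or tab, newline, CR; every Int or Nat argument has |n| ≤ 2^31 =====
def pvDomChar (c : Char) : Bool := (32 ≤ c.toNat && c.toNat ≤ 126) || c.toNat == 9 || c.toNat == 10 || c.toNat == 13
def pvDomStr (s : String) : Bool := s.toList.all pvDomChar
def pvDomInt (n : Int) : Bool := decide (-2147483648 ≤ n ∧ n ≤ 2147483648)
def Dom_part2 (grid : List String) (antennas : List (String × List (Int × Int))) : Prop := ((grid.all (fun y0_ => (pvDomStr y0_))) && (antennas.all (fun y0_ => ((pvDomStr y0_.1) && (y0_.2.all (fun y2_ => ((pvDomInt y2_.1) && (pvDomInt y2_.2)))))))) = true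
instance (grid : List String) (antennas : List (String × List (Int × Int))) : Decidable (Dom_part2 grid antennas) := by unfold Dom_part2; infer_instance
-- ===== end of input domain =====

-- B replaces A's per-cell inner scan over antenna2 by a per-antenna set of gcd-reduced
-- directions built once, classifying each cell with a single set lookup (objective: alternative).

-- ===== PORT A =====
def isColinear (point antenna1 antenna2 : Int × Int) : Bool :=
  (antenna1.1 - point.1) * (antenna2.2 - point.2) == (antenna1.2 - point.2) * (antenna2.1 - point.1)

-- A's inner 'for antenna2 …: if colinear: result += 1; break' loop: true iff the break fires
def scanA2 (p a1 : Int × Int) : List (Int × Int) → Bool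
  | [] => false
  | a2 :: rest =>
    if a2 = a1 then scanA2 p a1 rest
    else if isColinear p a1 a2 then true
    else scanA2 p a1 rest

-- 'len(grid[0])' is ported as the length of grid.headD ""; Python only evaluates grid[0]
-- inside 'for row in range(len(grid))', i.e. when grid is non-empty, where it is exact.
def part2 (grid : List String) (antennas : List (String × List (Int × Int))) : Int :=
  (PySem.Dict.ofList antennas).items.foldl (fun result kv =>
    if kv.2.length < 2 then result
    else
      (PySem.List.pyRange 0 (grid.length : Int) 1).foldl (fun result row =>
        (PySem.List.pyRange 0 (PySem.Str.len (grid.headD "")) 1).foldl (fun result col =>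
          kv.2.foldl (fun result a1 =>
            result + (if scanA2 (row, col) a1 kv.2 then 1 else 0)) result) result) result) 0

-- ===== PORT B =====
-- _gcd from Source B; it is only called on non-negative ints, where Nat's % is exactly Python's %
def gcdRec (a b : Nat) : Nat :=
  if h : b = 0 then a else gcdRec b (a % b)
termination_by b
decreasing_by exact Nat.mod_lt _ (Nat.pos_of_ne_zero h)

def reduceDir (dx dy : Int) : Int × Int :=
  let g : Int := (gcdRec dx.natAbs dy.natAbs : Nat)
  if g = 0 then (0, 0)
  else
    let a := PySem.Int.floordiv dx g
    let b := PySem.Int.floordiv dy g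
    if a < 0 ∨ (a = 0 ∧ b < 0) then (-a, -b) else (a, b)

def dirsOf (l : List (Int × Int)) (a1 : Int × Int) : PySem.Set (Int × Int) :=
  l.foldl (fun s a2 =>
    if a2 ≠ a1 then PySem.Set.add s (reduceDir (a2.1 - a1.1) (a2.2 - a1.2)) else s)
    PySem.Set.empty

def part2_alt (grid : List String) (antennas : List (String × List (Int × Int))) : Int :=
  let rows : Int := grid.length
  let cols : Int := match grid with | [] => 0 | g0 :: _ => PySem.Str.len g0
  (PySem.Dict.ofList antennas).values.foldl (fun total l =>
    l.foldl (fun total a1 =>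
      let dirs := dirsOf l a1
      if dirs = [] then total
      else
        (PySem.List.pyRange 0 rows 1).foldl (fun total r =>
          (PySem.List.pyRange 0 cols 1).foldl (fun total c =>
            total + (if (r, c) = a1 ∨ PySem.Set.contains dirs (reduceDir (r - a1.1) (c - a1.2)) then 1 else 0))
            total) total) total) 0

-- ===== PRECONDITION & SPEC =====
def Spec_part2 (grid : List String) (antennas : List (String × List (Int × Int))) (out : Int) : Prop := out = part2_alt grid antennas
instance (grid : List String) (antennas : List (String × List (Int × Int))) (out : Int) : Decidable (Spec_part2 grid antennas out) := by unfold Spec_part2; infer_instance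

-- ===== CLAIM (what is proved, stated in full; the proofs are below) =====
def Claim_equal_part2 : Prop := ∀ (grid : List String) (antennas : List (String × List (Int × Int))), Dom_part2 grid antennas → Spec_part2 grid antennas (part2 grid antennas)

-- ===== LEMMAS AND PROOFS =====

theorem gcdRec_eq (a b : Nat) : gcdRec a b = Nat.gcd a b := by
  induction b using Nat.strong_induction_on generalizing a with
  | _ b ih =>
    rw [gcdRec]
    split
    · simp [*]
    · rename_i h
      rw [ih _ (Nat.mod_lt _ (Nat.pos_of_ne_zero h)),
        Nat.gcd_comm b (a % b), ← Nat.gcd_rec b a, Nat.gcd_comm b a]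

theorem reduceDir_eq (x y : Int) (h : ¬(x = 0 ∧ y = 0)) :
    reduceDir x y =
      (if x / (Int.gcd x y : Nat) < 0 ∨ (x / (Int.gcd x y : Nat) = 0 ∧ y / (Int.gcd x y : Nat) < 0)
       then (-(x / (Int.gcd x y : Nat)), -(y / (Int.gcd x y : Nat)))
       else (x / (Int.gcd x y : Nat), y / (Int.gcd x y : Nat))) := by
  have hg : Int.gcd x y ≠ 0 := by
    simp only [ne_eq, Int.gcd_eq_zero_iff]; tauto
  have hgpos : (0:Int) < (Int.gcd x y : Nat) := by exact_mod_cast Nat.pos_of_ne_zero hg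
  rw [reduceDir]
  simp only [gcdRec_eq]
  rw [show (Nat.gcd x.natAbs y.natAbs) = Int.gcd x y from rfl]
  simp only [PySem.Int.floordiv_eq_ediv_of_pos hgpos]
  split
  · rename_i h0
    exact absurd (by exact_mod_cast h0) hg
  · rfl

theorem reduceDir_spec (x y : Int) (h : ¬(x = 0 ∧ y = 0)) :
    ∃ t : Int, t ≠ 0 ∧ x = t * (reduceDir x y).1 ∧ y = t * (reduceDir x y).2 ∧
      Int.gcd (reduceDir x y).1 (reduceDir x y).2 = 1 ∧
      ¬((reduceDir x y).1 < 0 ∨ ((reduceDir x y).1 = 0 ∧ (reduceDir x y).2 < 0)) := by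
  rw [reduceDir_eq x y h]
  have hg : Int.gcd x y ≠ 0 := by simp only [ne_eq, Int.gcd_eq_zero_iff]; tauto
  have hgpos : 0 < Int.gcd x y := Nat.pos_of_ne_zero hg
  have hdx : ((Int.gcd x y : Nat) : Int) ∣ x := Int.gcd_dvd_left x y
  have hdy : ((Int.gcd x y : Nat) : Int) ∣ y := Int.gcd_dvd_right x y
  have hxe : ((Int.gcd x y : Nat) : Int) * (x / (Int.gcd x y : Nat)) = x := Int.mul_ediv_cancel' hdx
  have hye : ((Int.gcd x y : Nat) : Int) * (y / (Int.gcd x y : Nat)) = y := Int.mul_ediv_cancel' hdy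
  have hcop : Int.gcd (x / (Int.gcd x y : Nat)) (y / (Int.gcd x y : Nat)) = 1 :=
    Int.gcd_div_gcd_div_gcd hgpos
  have hgne : ((Int.gcd x y : Nat) : Int) ≠ 0 := by exact_mod_cast hg
  split
  · refine ⟨-(Int.gcd x y : Nat), by simpa using hgne, by simp; linarith [hxe], by simp; linarith [hye], ?_, ?_⟩
    · simpa [Int.gcd] using hcop
    · rename_i hc
      rcases hc with h1 | ⟨h1, h2⟩ <;> omega
  · exact ⟨(Int.gcd x y : Nat), hgne, hxe.symm, hye.symm, hcop, by assumption⟩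

theorem reduceDir_smul (a b s : Int) (hs : s ≠ 0) (hcop : Int.gcd a b = 1)
    (hnorm : ¬(a < 0 ∨ (a = 0 ∧ b < 0))) : reduceDir (s * a) (s * b) = (a, b) := by
  have hab : ¬(a = 0 ∧ b = 0) := by
    rintro ⟨rfl, rfl⟩; simp at hcop
  have hsab : ¬(s * a = 0 ∧ s * b = 0) := by
    rintro ⟨h1, h2⟩
    exact hab ⟨by rcases mul_eq_zero.1 h1 with h | h; exact absurd h hs; exact h,
               by rcases mul_eq_zero.1 h2 with h | h; exact absurd h hs; exact h⟩
  rw [reduceDir_eq _ _ hsab]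
  have hgcd : Int.gcd (s * a) (s * b) = s.natAbs := by
    rw [Int.gcd_mul_left, hcop, mul_one]
  rw [hgcd]
  rcases lt_or_gt_of_ne hs with hneg | hpos
  · have habs : ((s.natAbs : Nat) : Int) = -s := by
      rw [Int.natCast_natAbs]; exact abs_of_neg hneg
    have hsne : (-s : Int) ≠ 0 := by omega
    have e1 : s * a / (-s) = -a := by
      rw [show s * a = -s * -a by ring, Int.mul_ediv_cancel_left _ hsne]
    have e2 : s * b / (-s) = -b := by
      rw [show s * b = -s * -b by ring, Int.mul_ediv_cancel_left _ hsne]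
    rw [habs, e1, e2, if_pos (by omega), neg_neg, neg_neg]
  · have habs : ((s.natAbs : Nat) : Int) = s := Int.natAbs_of_nonneg (le_of_lt hpos)
    rw [habs, Int.mul_ediv_cancel_left a hs, Int.mul_ediv_cancel_left b hs,
      if_neg hnorm]

theorem reduceDir_eq_of_cross (x y vx vy : Int) (hxy : ¬(x = 0 ∧ y = 0))
    (hv : ¬(vx = 0 ∧ vy = 0)) (hc : x * vy = y * vx) :
    reduceDir x y = reduceDir vx vy := by
  obtain ⟨t, ht, hx, hy, hcop, hnorm⟩ := reduceDir_spec x y hxy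
  set a := (reduceDir x y).1 with ha
  set b := (reduceDir x y).2 with hb
  have hc' : a * vy = b * vx := by
    have h2 : t * (a * vy) = t * (b * vx) := by rw [hx, hy] at hc; linarith [hc]
    exact mul_left_cancel₀ ht h2
  by_cases haz : a = 0
  · have hb1 : b = 1 := by
      rw [haz] at hcop
      have hn1 : b.natAbs = 1 := by simpa [Int.gcd] using hcop
      rcases Int.natAbs_eq_iff.1 hn1 with h1 | h1
      · exact_mod_cast h1
      · exfalso; rw [haz] at hnorm; omega
    have hvx0 : vx = 0 := by
      rw [haz, hb1] at hc'; simpa using hc'.symm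
    have hvyne : vy ≠ 0 := fun h0 => hv ⟨hvx0, h0⟩
    have key : reduceDir (vy * a) (vy * b) = (a, b) := reduceDir_smul a b vy hvyne hcop hnorm
    have e1 : vy * a = vx := by rw [haz, mul_zero, hvx0]
    have e2 : vy * b = vy := by rw [hb1, mul_one]
    rw [e1, e2] at key
    rw [key]
  · have hdvd : a ∣ vx := by
      have h1 : a ∣ vx * b := ⟨vy, by linarith [hc']⟩
      exact Int.dvd_of_dvd_mul_left_of_gcd_one h1 hcop
    obtain ⟨s, hvx⟩ := hdvd
    have hvy : vy = s * b := by
      have h2 : a * vy = a * (s * b) := by rw [hc', hvx]; ring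
      exact mul_left_cancel₀ haz h2
    have hs : s ≠ 0 := by
      rintro rfl
      exact hv ⟨by simp [hvx], by simp [hvy]⟩
    have key : reduceDir (s * a) (s * b) = (a, b) := reduceDir_smul a b s hs hcop hnorm
    rw [hvx, hvy, show a * s = s * a from mul_comm a s, key]

theorem cross_of_reduceDir_eq (x y vx vy : Int) (hxy : ¬(x = 0 ∧ y = 0))
    (hv : ¬(vx = 0 ∧ vy = 0)) (he : reduceDir x y = reduceDir vx vy) :
    x * vy = y * vx := by
  obtain ⟨t, ht, hx, hy, -, -⟩ := reduceDir_spec x y hxy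
  obtain ⟨s, hs, hvx, hvy, -, -⟩ := reduceDir_spec vx vy hv
  rw [← he] at hvx hvy
  conv_lhs => rw [hx, hvy]
  conv_rhs => rw [hy, hvx]
  ring

theorem isColinear_iff (p a1 a2 : Int × Int) (hne : a2 ≠ a1) :
    isColinear p a1 a2 = true ↔
      (p = a1 ∨ reduceDir (p.1 - a1.1) (p.2 - a1.2) = reduceDir (a2.1 - a1.1) (a2.2 - a1.2)) := by
  have hv : ¬(a2.1 - a1.1 = 0 ∧ a2.2 - a1.2 = 0) := by
    rintro ⟨h1, h2⟩
    exact hne (Prod.ext_iff.2 ⟨by omega, by omega⟩)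
  rw [isColinear, beq_iff_eq]
  constructor
  · intro hc
    by_cases hp : p = a1
    · exact Or.inl hp
    · refine Or.inr (reduceDir_eq_of_cross _ _ _ _ ?_ hv ?_)
      · rintro ⟨h1, h2⟩
        exact hp (Prod.ext_iff.2 ⟨by omega, by omega⟩)
      · linear_combination -hc
  · rintro (rfl | hred)
    · ring
    · by_cases hp : p = a1
      · subst hp; ring
      · have hxy : ¬(p.1 - a1.1 = 0 ∧ p.2 - a1.2 = 0) := by
          rintro ⟨h1, h2⟩
          exact hp (Prod.ext_iff.2 ⟨by omega, by omega⟩)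
        have := cross_of_reduceDir_eq _ _ _ _ hxy hv hred
        linear_combination -this

theorem scanA2_iff (p a1 : Int × Int) (l : List (Int × Int)) :
    scanA2 p a1 l = true ↔ ∃ a2 ∈ l, a2 ≠ a1 ∧ isColinear p a1 a2 = true := by
  induction l with
  | nil => simp [scanA2]
  | cons a2 rest ih =>
    rw [scanA2]
    split_ifs with h1 h2
    · subst h1
      rw [ih]
      simp only [List.mem_cons]
      constructor
      · rintro ⟨x, hx, hxne, hxc⟩; exact ⟨x, Or.inr hx, hxne, hxc⟩
      · rintro ⟨x, (rfl | hx), hxne, hxc⟩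
        · exact absurd rfl hxne
        · exact ⟨x, hx, hxne, hxc⟩
    · simp only [List.mem_cons]
      exact iff_of_true trivial ⟨a2, Or.inl rfl, h1, h2⟩
    · rw [ih]
      simp only [List.mem_cons]
      constructor
      · rintro ⟨x, hx, hxne, hxc⟩; exact ⟨x, Or.inr hx, hxne, hxc⟩
      · rintro ⟨x, (rfl | hx), hxne, hxc⟩
        · exact absurd hxc h2
        · exact ⟨x, hx, hxne, hxc⟩

theorem mem_dirsOf (l : List (Int × Int)) (a1 y : Int × Int) :
    y ∈ dirsOf l a1 ↔ ∃ a2 ∈ l, a2 ≠ a1 ∧ y = reduceDir (a2.1 - a1.1) (a2.2 - a1.2) := by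
  suffices h : ∀ (s : PySem.Set (Int × Int)),
      y ∈ l.foldl (fun s a2 =>
        if a2 ≠ a1 then PySem.Set.add s (reduceDir (a2.1 - a1.1) (a2.2 - a1.2)) else s) s ↔
      y ∈ s ∨ ∃ a2 ∈ l, a2 ≠ a1 ∧ y = reduceDir (a2.1 - a1.1) (a2.2 - a1.2) by
    rw [dirsOf, h PySem.Set.empty]
    simp [PySem.Set.empty]
  intro s
  induction l generalizing s with
  | nil => simp
  | cons a2 rest ih =>
    simp only [List.foldl_cons]
    split_ifs with h1
    · rw [ih, PySem.Set.mem_add]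
      simp only [List.mem_cons]
      constructor
      · rintro ((hs | rfl) | ⟨x, hx, hxne, rfl⟩)
        · exact Or.inl hs
        · exact Or.inr ⟨a2, Or.inl rfl, h1, rfl⟩
        · exact Or.inr ⟨x, Or.inr hx, hxne, rfl⟩
      · rintro (hs | ⟨x, (rfl | hx), hxne, rfl⟩)
        · exact Or.inl (Or.inl hs)
        · exact Or.inl (Or.inr rfl)
        · exact Or.inr ⟨x, hx, hxne, rfl⟩
    · rw [ih]
      simp only [List.mem_cons]
      constructor
      · rintro (hs | ⟨x, hx, hxne, rfl⟩)
        · exact Or.inl hs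
        · exact Or.inr ⟨x, Or.inr hx, hxne, rfl⟩
      · rintro (hs | ⟨x, (rfl | hx), hxne, rfl⟩)
        · exact Or.inl hs
        · exact absurd hxne h1
        · exact Or.inr ⟨x, hx, hxne, rfl⟩

theorem dirsOf_eq_nil_iff (l : List (Int × Int)) (a1 : Int × Int) :
    dirsOf l a1 = [] ↔ ∀ a2 ∈ l, a2 = a1 := by
  rw [List.eq_nil_iff_forall_not_mem]
  constructor
  · intro h a2 ha2
    by_contra hne
    exact h _ ((mem_dirsOf l a1 _).2 ⟨a2, ha2, hne, rfl⟩)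
  · intro h y hy
    obtain ⟨a2, ha2, hne, -⟩ := (mem_dirsOf l a1 y).1 hy
    exact hne (h a2 ha2)

def cellsSum (rows cols : Int) (f : Int × Int → Int) : Int :=
  ((PySem.List.pyRange 0 rows 1).map (fun r =>
    ((PySem.List.pyRange 0 cols 1).map (fun c => f (r, c))).sum)).sum

theorem map_sum_comm {α γ : Type} (xs : List α) (l : List γ) (f : α → γ → Int) :
    (xs.map (fun x => (l.map (f x)).sum)).sum
      = (l.map (fun a => (xs.map (fun x => f x a)).sum)).sum := by
  induction xs with
  | nil => simp
  | cons x xs ih =>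
    simp only [List.map_cons, List.sum_cons, ih]
    rw [← PySem.List.sum_map_add_int]

theorem foldl_skip_add {α : Type} (l : List α) (p : α → Prop) [DecidablePred p]
    (g : α → Int) (a : Int) :
    l.foldl (fun acc x => if p x then acc else acc + g x) a
      = a + (l.map (fun x => if p x then 0 else g x)).sum := by
  induction l generalizing a with
  | nil => simp
  | cons x xs ih =>
    simp only [List.foldl_cons, List.map_cons, List.sum_cons]
    split_ifs with h
    · rw [ih]; ring
    · rw [ih]; ring

theorem cellsSum_swap (R C : Int) {γ : Type} (l : List γ) (h : Int × Int → γ → Int) :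
    cellsSum R C (fun p => (l.map (h p)).sum)
      = (l.map (fun a => cellsSum R C (fun p => h p a))).sum := by
  rw [cellsSum]
  have step1 : (PySem.List.pyRange 0 R 1).map (fun r =>
        ((PySem.List.pyRange 0 C 1).map (fun c => (l.map (h (r, c))).sum)).sum)
      = (PySem.List.pyRange 0 R 1).map (fun r =>
        (l.map (fun a => ((PySem.List.pyRange 0 C 1).map (fun c => h (r, c) a)).sum)).sum) := by
    refine List.map_congr_left (fun r _ => ?_)
    exact map_sum_comm _ l (fun c a => h (r, c) a)
  rw [step1, map_sum_comm _ l (fun r a => ((PySem.List.pyRange 0 C 1).map (fun c => h (r, c) a)).sum)]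
  rfl

theorem cellsSum_zero (R C : Int) : cellsSum R C (fun _ => 0) = 0 := by
  simp [cellsSum]

theorem cellsSum_congr (R C : Int) (f g : Int × Int → Int) (h : ∀ p, f p = g p) :
    cellsSum R C f = cellsSum R C g := by
  rw [cellsSum, cellsSum]
  refine congrArg List.sum (List.map_congr_left (fun r _ => ?_))
  exact congrArg List.sum (List.map_congr_left (fun c _ => h (r, c)))


theorem foldl_plus {α : Type} (l : List α) (F : Int → α → Int) (G : α → Int)
    (h : ∀ acc x, x ∈ l → F acc x = acc + G x) (a : Int) :
    l.foldl F a = a + (l.map G).sum := by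
  calc l.foldl F a = l.foldl (fun acc x => acc + G x) a := PySem.List.foldl_congr_mem l F _ a h
    _ = a + (l.map G).sum := PySem.List.foldl_add l G a

theorem cols_match_eq (grid : List String) :
    (match grid with | [] => (0 : Int) | g0 :: _ => PySem.Str.len g0)
      = PySem.Str.len (grid.headD "") := by
  cases grid <;> rfl

theorem part2_eq (grid : List String) (antennas : List (String × List (Int × Int))) :
    part2 grid antennas
      = ((PySem.Dict.ofList antennas).items.map (fun kv =>
          if kv.2.length < 2 then 0
          else cellsSum (grid.length : Int) (PySem.Str.len (grid.headD ""))
            (fun p => (kv.2.map (fun a1 => if scanA2 p a1 kv.2 then (1 : Int) else 0)).sum))).sum := by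
  rw [part2]
  simp only [PySem.List.foldl_add]
  rw [foldl_skip_add _ (fun kv : String × List (Int × Int) => kv.2.length < 2) _ 0, zero_add]
  rfl

theorem altInner (R C : Int) (l : List (Int × Int)) (total : Int) :
    l.foldl (fun total a1 =>
      let dirs := dirsOf l a1
      if dirs = [] then total
      else
        (PySem.List.pyRange 0 R 1).foldl (fun total r =>
          (PySem.List.pyRange 0 C 1).foldl (fun total c =>
            total + (if (r, c) = a1 ∨ PySem.Set.contains dirs (reduceDir (r - a1.1) (c - a1.2)) then 1 else 0))
            total) total) total
      = total + (l.map (fun a1 =>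
          if dirsOf l a1 = [] then 0
          else cellsSum R C (fun p =>
            if p = a1 ∨ PySem.Set.contains (dirsOf l a1) (reduceDir (p.1 - a1.1) (p.2 - a1.2)) = true then 1 else 0))).sum := by
  simp only [PySem.List.foldl_add]
  rw [foldl_skip_add _ (fun a1 => dirsOf l a1 = []) _ total]
  rfl

theorem part2_alt_eq (grid : List String) (antennas : List (String × List (Int × Int))) :
    part2_alt grid antennas
      = ((PySem.Dict.ofList antennas).items.map (fun kv =>
          (kv.2.map (fun a1 =>
            if dirsOf kv.2 a1 = [] then 0
            else cellsSum (grid.length : Int) (PySem.Str.len (grid.headD ""))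
              (fun p => if p = a1 ∨ PySem.Set.contains (dirsOf kv.2 a1) (reduceDir (p.1 - a1.1) (p.2 - a1.2)) = true then 1 else 0))).sum)).sum := by
  rw [part2_alt.eq_def]
  simp only [cols_match_eq, PySem.Dict.values, List.foldl_map]
  refine (foldl_plus _ _ _ ?_ 0).trans (zero_add _)
  intro acc kv _
  exact altInner _ _ kv.2 acc

theorem scan_characterization (l : List (Int × Int)) (a1 p : Int × Int) :
    scanA2 p a1 l = true ↔
      (dirsOf l a1 ≠ [] ∧ (p = a1 ∨ reduceDir (p.1 - a1.1) (p.2 - a1.2) ∈ dirsOf l a1)) := by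
  rw [scanA2_iff]
  constructor
  · rintro ⟨a2, ha2, hne, hcol⟩
    have hmemdir : dirsOf l a1 ≠ [] := by
      rw [ne_eq, dirsOf_eq_nil_iff]
      intro h; exact hne (h a2 ha2)
    rcases (isColinear_iff p a1 a2 hne).1 hcol with hp | hred
    · exact ⟨hmemdir, Or.inl hp⟩
    · exact ⟨hmemdir, Or.inr ((mem_dirsOf l a1 _).2 ⟨a2, ha2, hne, hred⟩)⟩
  · rintro ⟨hdirs, hp | hmem⟩
    · rw [ne_eq, dirsOf_eq_nil_iff] at hdirs
      rw [not_forall] at hdirs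
      obtain ⟨a2, ha2⟩ := hdirs
      rw [Classical.not_imp] at ha2
      obtain ⟨ha2m, hne⟩ := ha2
      exact ⟨a2, ha2m, hne, (isColinear_iff p a1 a2 hne).2 (Or.inl hp)⟩
    · obtain ⟨a2, ha2, hne, hred⟩ := (mem_dirsOf l a1 _).1 hmem
      exact ⟨a2, ha2, hne, (isColinear_iff p a1 a2 hne).2 (Or.inr hred)⟩

theorem perA1_eq (R C : Int) (l : List (Int × Int)) (a1 : Int × Int) :
    cellsSum R C (fun p => (if scanA2 p a1 l then (1 : Int) else 0))
      = (if dirsOf l a1 = [] then 0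
         else cellsSum R C (fun p =>
           if p = a1 ∨ PySem.Set.contains (dirsOf l a1) (reduceDir (p.1 - a1.1) (p.2 - a1.2)) = true then 1 else 0)) := by
  split_ifs with hdirs
  · have hz : ∀ p, (if scanA2 p a1 l then (1 : Int) else 0) = 0 := by
      intro p
      have hf : scanA2 p a1 l = false := by
        rw [← Bool.not_eq_true, scan_characterization]
        rintro ⟨hne, -⟩; exact hne hdirs
      rw [hf]; simp
    rw [cellsSum_congr _ _ _ _ hz, cellsSum_zero]
  · refine cellsSum_congr _ _ _ _ (fun p => ?_)
    have hiff : scanA2 p a1 l = true ↔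
        (p = a1 ∨ PySem.Set.contains (dirsOf l a1) (reduceDir (p.1 - a1.1) (p.2 - a1.2)) = true) := by
      rw [scan_characterization, PySem.Set.contains_iff]
      tauto
    exact if_congr hiff rfl rfl

theorem perList_eq (R C : Int) (l : List (Int × Int)) :
    (if l.length < 2 then 0
     else cellsSum R C (fun p => (l.map (fun a1 => if scanA2 p a1 l then (1 : Int) else 0)).sum))
      = (l.map (fun a1 =>
          if dirsOf l a1 = [] then 0
          else cellsSum R C (fun p =>
            if p = a1 ∨ PySem.Set.contains (dirsOf l a1) (reduceDir (p.1 - a1.1) (p.2 - a1.2)) = true then 1 else 0))).sum := by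
  have main : (l.map (fun a1 => cellsSum R C (fun p => if scanA2 p a1 l then (1 : Int) else 0))).sum
      = (l.map (fun a1 =>
          if dirsOf l a1 = [] then 0
          else cellsSum R C (fun p =>
            if p = a1 ∨ PySem.Set.contains (dirsOf l a1) (reduceDir (p.1 - a1.1) (p.2 - a1.2)) = true then 1 else 0))).sum :=
    congrArg List.sum (List.map_congr_left (fun a1 _ => perA1_eq R C l a1))
  split_ifs with hlen
  · match l, hlen with
    | [], _ => simp
    | [a], _ =>
      simp only [List.map_cons, List.map_nil, List.sum_cons, List.sum_nil]
      have : dirsOf [a] a = [] := by simp [dirsOf, PySem.Set.empty]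
      rw [if_pos this]
      ring
  · rw [← main, cellsSum_swap]

-- ===== VERDICT (by name: the statement is the Claim_ definition above) =====
theorem part2_spec : Claim_equal_part2 := by
  intro grid antennas _
  unfold Spec_part2
  rw [part2_eq, part2_alt_eq]
  exact congrArg List.sum (List.map_congr_left (fun kv _ => perList_eq _ _ kv.2))
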